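-- pv_equiv track=rewrite | github.com/saturnin13/crypto-mining-data-analysis | project/src/data_analysis/graph_management/graph_manager.py | __convert_to_ints
-- ===== SOURCE A (Python) =====
-- def __convert_to_ints(items):
--     seen_value = {}
--     index = 1
--     result = []
--     for item in items:
--         if(item not in seen_value):
--             seen_value[item] = index
--             index += 1
--         result.append(seen_value[item])
--     return result
-- ===== SOURCE B (Python) =====
-- def __convert_to_ints(items):
--     # code of x = number of distinct values seen up to (and including) x's first occurrence
--     return [len(set(items[:items.index(x) + 1])) for x in items]
-- ===== Notes on version B (the rewrite author's own statement) =====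
-- stated objective: alternative
-- what changed: Drops A's dict/counter state entirely: each code is recomputed independently as the number of distinct values in the prefix ending at the item's first occurrence (list.index + set of a slice), a stateless quadratic brute force instead of A's stateful single pass.
import Mathlib
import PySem

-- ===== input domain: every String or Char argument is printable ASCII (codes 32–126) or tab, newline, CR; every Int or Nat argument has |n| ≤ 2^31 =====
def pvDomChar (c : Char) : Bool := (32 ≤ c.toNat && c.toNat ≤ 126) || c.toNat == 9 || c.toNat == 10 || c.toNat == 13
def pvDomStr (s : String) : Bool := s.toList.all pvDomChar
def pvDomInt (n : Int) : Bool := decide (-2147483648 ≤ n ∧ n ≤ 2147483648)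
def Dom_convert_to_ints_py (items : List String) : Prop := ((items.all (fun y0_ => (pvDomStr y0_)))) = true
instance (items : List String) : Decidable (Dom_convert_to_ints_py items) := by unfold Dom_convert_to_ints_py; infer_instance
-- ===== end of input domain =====

-- B replaces A's stateful dict+counter loop by a stateless quadratic brute force: each code is the
-- number of distinct values in the prefix ending at the item's first occurrence; objective: alternative.


-- ===== PORT A =====
-- state = (seen_value, index, result); getD item 0 is seen_value[item], whose key is always present at that point
def aStep (st : (PySem.Dict String Int) × Int × List Int) (item : String) :
    (PySem.Dict String Int) × Int × List Int :=
  let st' := if st.1.contains item then st else (st.1.insert item st.2.1, st.2.1 + 1, st.2.2)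
  (st'.1, st'.2.1, st'.2.2 ++ [st'.1.getD item 0])

def convert_to_ints_py (items : List String) : List Int :=
  (items.foldl aStep (PySem.Dict.empty, 1, [])).2.2

-- ===== PORT B =====
-- [len(set(items[:items.index(x) + 1])) for x in items]; items.index(x) never fails (x ∈ items), so .getD 0
def convert_to_ints_py_alt (items : List String) : List Int :=
  items.map (fun x =>
    let i : Nat := (PySem.List.index? items x).getD 0
    ((PySem.Set.ofList (PySem.List.slice items none (some ((i : Int) + 1)))).length : Int))

-- ===== PRECONDITION & SPEC =====
def Spec_convert_to_ints_py (items : List String) (out : List Int) : Prop := out = convert_to_ints_py_alt items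
instance (items : List String) (out : List Int) : Decidable (Spec_convert_to_ints_py items out) := by unfold Spec_convert_to_ints_py; infer_instance

-- ===== CLAIM (what is proved, stated in full; the proofs are below) =====
def Claim_equal_convert_to_ints_py : Prop := ∀ (items : List String), Dom_convert_to_ints_py items → Spec_convert_to_ints_py items (convert_to_ints_py items)

-- ===== LEMMAS AND PROOFS =====

theorem dedup_append_singleton (P : List String) (y : String) :
    PySem.List.dedup (P ++ [y])
      = if y ∈ PySem.List.dedup P then PySem.List.dedup P else PySem.List.dedup P ++ [y] := by
  simp only [PySem.List.dedup_eq_ofList, PySem.Set.ofList, List.foldl_append, List.foldl_cons,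
    List.foldl_nil]
  simp [PySem.Set.add, PySem.Set.contains]

-- invariant for A's loop over a processed prefix P
theorem aInvariant (P : List String) :
    (∀ x, (P.foldl aStep (PySem.Dict.empty, 1, [])).1.getD x 0
        = if x ∈ P then ((PySem.List.dedup P).idxOf x : Int) + 1 else 0)
    ∧ (∀ x, (P.foldl aStep (PySem.Dict.empty, 1, [])).1.contains x = decide (x ∈ P))
    ∧ (P.foldl aStep (PySem.Dict.empty, 1, [])).2.1 = ((PySem.List.dedup P).length : Int) + 1
    ∧ (P.foldl aStep (PySem.Dict.empty, 1, [])).2.2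
        = P.map (fun x => ((PySem.List.dedup P).idxOf x : Int) + 1) := by
  induction P using List.reverseRecOn with
  | nil => refine ⟨?_, ?_, ?_, ?_⟩ <;> simp [PySem.List.dedup]
  | append_singleton P y ih =>
    obtain ⟨ihg, ihc, ihi, ihr⟩ := ih
    rw [List.foldl_append] at *
    simp only [List.foldl_cons, List.foldl_nil]
    have hmemdd : ∀ x, x ∈ PySem.List.dedup P ↔ x ∈ P := fun x => PySem.List.mem_dedup P x
    by_cases hy : y ∈ P
    · have hdd : PySem.List.dedup (P ++ [y]) = PySem.List.dedup P := by
        rw [dedup_append_singleton, if_pos ((hmemdd y).mpr hy)]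
      have hc : (P.foldl aStep (PySem.Dict.empty, 1, [])).1.contains y = true := by
        rw [ihc]; simp [hy]
      refine ⟨?_, ?_, ?_, ?_⟩ <;> simp only [aStep, hc, if_true, hdd]
      · intro x; rw [ihg]
        by_cases hx : x = y
        · subst hx; simp [hy]
        · simp [hx]
      · intro x; rw [ihc]
        by_cases hx : x = y
        · subst hx; simp [hy]
        · simp [hx]
      · exact ihi
      · rw [ihr, ihg, List.map_append]
        simp [hy]
    · have hynd : y ∉ PySem.List.dedup P := fun h => hy ((hmemdd y).mp h)
      have hdd : PySem.List.dedup (P ++ [y]) = PySem.List.dedup P ++ [y] := by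
        rw [dedup_append_singleton, if_neg hynd]
      have hc : (P.foldl aStep (PySem.Dict.empty, 1, [])).1.contains y = false := by
        rw [ihc]; simp [hy]
      have hidx : ∀ x, x ∈ P → (PySem.List.dedup P ++ [y]).idxOf x
          = (PySem.List.dedup P).idxOf x := by
        intro x hx
        rw [List.idxOf_append_of_mem ((hmemdd x).mpr hx)]
      have hidy : (PySem.List.dedup P ++ [y]).idxOf y = (PySem.List.dedup P).length := by
        rw [List.idxOf_append_of_notMem hynd]; simp
      refine ⟨?_, ?_, ?_, ?_⟩ <;> simp only [aStep, hc, if_false, Bool.false_eq_true, hdd]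
      · intro x
        by_cases hx : x = y
        · subst hx
          rw [PySem.Dict.getD_insert_self, ihi, hidy]
          simp
        · rw [PySem.Dict.getD_insert, if_neg hx, ihg]
          by_cases hxP : x ∈ P
          · rw [if_pos hxP, if_pos (by simp [hxP]), hidx x hxP]
          · rw [if_neg hxP, if_neg (by simp [hxP, hx])]
      · intro x
        rw [PySem.Dict.contains_insert, ihc]
        by_cases hx : x = y
        · subst hx; simp
        · simp [hx]
      · rw [ihi]; rw [hdd] at *
        simp only [List.length_append, List.length_cons, List.length_nil]
        push_cast; ring
      · rw [ihr, List.map_append, PySem.Dict.getD_insert_self, ihi]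
        congr 1
        · apply List.map_congr_left
          intro x hx
          rw [hidx x hx]
        · simp only [List.map_cons, List.map_nil, hidy]

-- folding Set.add only appends: the accumulator is a prefix of the result
theorem foldl_add_suffix (l : List String) : ∀ (s : List String),
    ∃ r, List.foldl PySem.Set.add s l = s ++ r := by
  induction l with
  | nil => intro s; exact ⟨[], by simp⟩
  | cons y ys ih =>
    intro s
    obtain ⟨r, hr⟩ := ih (PySem.Set.add s y)
    simp only [List.foldl_cons, hr]
    by_cases h : y ∈ s
    · exact ⟨r, by simp [PySem.Set.add, PySem.Set.contains, h]⟩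
    · exact ⟨y :: r, by simp [PySem.Set.add, PySem.Set.contains, h]⟩

-- B's per-element value is first-appearance rank (1-based) in the dedup list
theorem b_elem_eq (items : List String) (x : String) (hx : x ∈ items) :
    ((PySem.Set.ofList (PySem.List.slice items none
        (some ((((PySem.List.index? items x).getD 0 : Nat) : Int) + 1)))).length : Int)
      = ((PySem.List.dedup items).idxOf x : Int) + 1 := by
  obtain ⟨i, hi⟩ := (PySem.List.index?_isSome_iff items x).mpr hx |> Option.isSome_iff_exists.mp
  obtain ⟨pre, suf, hsplit, hlen, hnpre⟩ := (PySem.List.index?_eq_some_iff items x i).mp hi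
  rw [hi]
  simp only [Option.getD_some]
  have hcast : ((i : Int) + 1) = (((i + 1 : Nat) : Int)) := by push_cast; ring
  rw [hcast, PySem.List.slice_to_natCast]
  have hofl : ∀ (l : List String), PySem.List.dedup l = List.foldl PySem.Set.add PySem.Set.empty l := by
    intro l; rw [PySem.List.dedup_eq_ofList, PySem.Set.ofList_eq_foldl]; rfl
  have htake : items.take (i + 1) = pre ++ [x] := by
    subst hsplit hlen
    simp [List.take_append]
  have hnd : x ∉ PySem.List.dedup pre := fun h => hnpre ((PySem.List.mem_dedup pre x).mp h)
  have h1 : PySem.List.dedup (pre ++ [x]) = PySem.List.dedup pre ++ [x] := by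
    rw [dedup_append_singleton, if_neg hnd]
  have h2 : ∃ r, PySem.List.dedup items = (PySem.List.dedup pre ++ [x]) ++ r := by
    obtain ⟨r, hr⟩ := foldl_add_suffix suf (List.foldl PySem.Set.add PySem.Set.empty (pre ++ [x]))
    refine ⟨r, ?_⟩
    have heq : items = (pre ++ [x]) ++ suf := by simp [hsplit]
    rw [heq, hofl, List.foldl_append, hr, ← hofl, h1]
  obtain ⟨r, hr⟩ := h2
  rw [hr, List.append_assoc, List.idxOf_append_of_notMem hnd, htake,
    PySem.List.dedup_eq_ofList] at *
  rw [h1]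
  simp [PySem.List.dedup_eq_ofList]

-- ===== VERDICT (by name: the statement is the Claim_ definition above) =====
theorem convert_to_ints_py_spec : Claim_equal_convert_to_ints_py := by
  intro items _
  unfold Spec_convert_to_ints_py convert_to_ints_py convert_to_ints_py_alt
  rw [(aInvariant items).2.2.2]
  apply List.map_congr_left
  intro x hx
  exact (b_elem_eq items x hx).symm
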